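-- pv_equiv track=rewrite | github.com/Kaushal845/Database_1 | query_engine.py | _filter_conflicting_mongo_paths
-- ===== SOURCE A (Python) =====
-- from typing import Any, Callable, Dict, List, Optional
--
-- def _filter_conflicting_mongo_paths(fields: List[str]) -> List[str]:
--     """
--     Remove fields that would cause MongoDB path collisions.
--     Rules:
--     1. If both parent path 'audit' and children 'audit.flags[0]' are present, keep only parent
--     2. If multiple indexed paths like 'audit.flags[0]', 'audit.flags[1]' are present, keep only one
--     3. Simplified rule: when there's ambiguity, prefer less specific paths
--     """
--     filtered = []
--
--     for field in fields:
--         has_conflict = False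
--
--         # Check if this field conflicts with any other field
--         for other_field in fields:
--             if field == other_field:
--                 continue
--
--             # Case 1: field is a child of other_field (e.g., 'audit.flags[0]' child of 'audit')
--             # If parent exists, skip the child
--             if field.startswith(other_field + '.') or field.startswith(other_field + '['):
--                 has_conflict = True
--                 break
--
--             # Case 2: field is parent of other_field (e.g., 'audit' parent of 'audit.flags[0]')
--             # If parent and child exist, skip the child (other_field)
--             # This will be handled in the first case when we process other_field
--
--             # Case 3: both are indexed versions of the same parent (e.g., 'audit.flags[0]' and 'audit.flags[1]')
--             # Extract parent path
--             if '[' in field and ']' in field: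
--                 field_parent = field[:field.index('[')]
--                 if '[' in other_field and ']' in other_field:
--                     other_parent = other_field[:other_field.index('[')]
--                     if field_parent == other_parent:
--                         # Same parent, keep only the lexicographically first one
--                         if field > other_field:
--                             has_conflict = True
--                             break
--
--         if not has_conflict:
--             filtered.append(field)
--
--     # Remove duplicates while preserving order
--     seen = set()
--     result = []
--     for field in filtered:
--         if field not in seen:
--             seen.add(field)
--             result.append(field)
--     return result
-- ===== SOURCE B (Python) =====
-- from typing import List
--
--
-- def _has_parent_prefix(field, field_set):
--     # True iff some strict prefix of `field` ending right before '.' or '[' is itself a field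
--     prefix = []
--     for ch in field:
--         if ch in '.[' and ''.join(prefix) in field_set:
--             return True
--         prefix.append(ch)
--     return False
--
--
-- def _filter_conflicting_mongo_paths(fields: List[str]) -> List[str]:
--     field_set = set(fields)
--     # minimum indexed path per parent, computed in one pass
--     mins = {}
--     for f in fields:
--         if '[' in f and ']' in f:
--             p = f[:f.index('[')]
--             m = mins.get(p)
--             if m is None or f < m:
--                 mins[p] = f
--     seen = set()
--     result = []
--     for f in fields:
--         keep = not _has_parent_prefix(f, field_set)
--         if keep and '[' in f and ']' in f:
--             keep = mins.get(f[:f.index('[')]) == f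
--         if keep and f not in seen:
--             seen.add(f)
--             result.append(f)
--     return result
-- ===== Notes on version B (the rewrite author's own statement) =====
-- stated objective: faster
-- what changed: A compares every field against every other field (all-pairs prefix and same-parent tests); B makes one pass per field, testing its '.'/'['-cut prefixes against a set of all fields and comparing against a precomputed per-parent minimum indexed path, so the inner scan over fields disappears.
import Mathlib
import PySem

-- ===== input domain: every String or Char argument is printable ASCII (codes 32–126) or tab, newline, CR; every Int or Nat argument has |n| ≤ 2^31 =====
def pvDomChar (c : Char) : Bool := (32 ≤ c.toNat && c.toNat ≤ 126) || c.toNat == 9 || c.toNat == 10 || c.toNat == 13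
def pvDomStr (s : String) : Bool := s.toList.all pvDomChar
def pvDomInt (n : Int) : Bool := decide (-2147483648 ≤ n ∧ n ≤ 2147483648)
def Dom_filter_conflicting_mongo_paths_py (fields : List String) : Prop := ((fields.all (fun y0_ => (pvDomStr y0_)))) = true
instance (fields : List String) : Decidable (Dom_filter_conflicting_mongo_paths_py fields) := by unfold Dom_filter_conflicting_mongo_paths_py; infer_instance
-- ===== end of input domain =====

-- B replaces A's quadratic all-pairs conflict scan by one pass with a set of fields (prefix checks)
-- and a per-parent minimum dictionary for indexed paths; objective: faster (O(n²·L) → O(n·L²)).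

-- ===== PORT A =====
-- shared string helpers (used verbatim by both Pythons): '[' in f and ']' in f; f[:f.index('[')]
def pvIndexed (f : String) : Bool :=
  PySem.Chars.isIn ['['] f.toList && PySem.Chars.isIn [']'] f.toList

-- f[:f.index('[')]; in both programs it is evaluated only under the guard '[' in f, where .index = .find
def pvParent (f : String) : List Char :=
  PySem.Chars.slice f.toList none (some (PySem.Chars.find f.toList ['[']))

-- field.startswith(other_field + '.') or field.startswith(other_field + '[')
def pvC1 (f o : String) : Bool :=
  PySem.Chars.startswith f.toList (o.toList ++ ['.']) ||
  PySem.Chars.startswith f.toList (o.toList ++ ['['])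

-- A's case-3 test: both indexed, same parent, field > other_field (i.e. other < field)
def pvC3 (f o : String) : Bool :=
  pvIndexed f && pvIndexed o && pvParent f == pvParent o && PySem.Chars.strLt o.toList f.toList

-- A's inner loop over `fields` with continue/break
def pvAConflict (f : String) : List String → Bool
  | [] => false
  | o :: rest =>
    if f == o then pvAConflict f rest
    else if pvC1 f o then true
    else if pvC3 f o then true
    else pvAConflict f rest

-- 'if field not in seen: seen.add(field); result.append(field)' (both Pythons' dedup body)
def pvDedupStep (st : PySem.Set String × List String) (f : String) :
    PySem.Set String × List String :=
  if PySem.Set.contains st.1 f then st else (PySem.Set.add st.1 f, st.2 ++ [f])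

def filter_conflicting_mongo_paths_py (fields : List String) : List String :=
  let filtered := fields.foldl (fun acc f => if pvAConflict f fields then acc else acc ++ [f]) []
  (filtered.foldl pvDedupStep (PySem.Set.empty, [])).2

-- ===== PORT B =====
-- _has_parent_prefix: walk f once, at each '.'/'[' test whether the prefix so far is a field
-- (the Python set of strings is modelled as a PySem.Set of their character lists)
def pvScan (S : PySem.Set (List Char)) : List Char → List Char → Bool
  | _, [] => false
  | pre, c :: rest =>
    if (c == '.' || c == '[') && PySem.Set.contains S pre then true
    else pvScan S (pre ++ [c]) rest

-- one step of B's first pass: mins[p] = min over the indexed paths sharing parent p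
def pvMinStep (d : PySem.Dict (List Char) String) (f : String) : PySem.Dict (List Char) String :=
  if pvIndexed f then
    match PySem.Dict.get? d (pvParent f) with
    | none => PySem.Dict.insert d (pvParent f) f
    | some m => if PySem.Chars.strLt f.toList m.toList then PySem.Dict.insert d (pvParent f) f else d
  else d

-- B's keep test: no parent prefix present, and (if indexed) f is its group's minimum
def pvKeepB (S : PySem.Set (List Char)) (mins : PySem.Dict (List Char) String) (f : String) : Bool :=
  !pvScan S [] f.toList &&
  (if pvIndexed f then PySem.Dict.get? mins (pvParent f) == some f else true)

def filter_conflicting_mongo_paths_py_alt (fields : List String) : List String :=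
  let S := PySem.Set.ofList (fields.map String.toList)
  let mins := fields.foldl pvMinStep PySem.Dict.empty
  (fields.foldl (fun st f => if pvKeepB S mins f then pvDedupStep st f else st)
    (PySem.Set.empty, [])).2

-- ===== PRECONDITION & SPEC =====
def Spec_filter_conflicting_mongo_paths_py (fields : List String) (out : List String) : Prop := out = filter_conflicting_mongo_paths_py_alt fields
instance (fields : List String) (out : List String) : Decidable (Spec_filter_conflicting_mongo_paths_py fields out) := by unfold Spec_filter_conflicting_mongo_paths_py; infer_instance

-- ===== CLAIM (what is proved, stated in full; the proofs are below) =====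
def Claim_equal_filter_conflicting_mongo_paths_py : Prop := ∀ (fields : List String), Dom_filter_conflicting_mongo_paths_py fields → Spec_filter_conflicting_mongo_paths_py fields (filter_conflicting_mongo_paths_py fields)

-- ===== LEMMAS AND PROOFS =====

theorem pvAConflict_eq_any (f : String) (l : List String) :
    pvAConflict f l = l.any (fun o => !(f == o) && (pvC1 f o || pvC3 f o)) := by
  induction l with
  | nil => rfl
  | cons o rest ih =>
    simp only [pvAConflict, List.any_cons]
    by_cases h1 : f == o
    · simp [h1, ih]
    · by_cases h2 : pvC1 f o
      · simp [h1, h2]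
      · by_cases h3 : pvC3 f o
        · simp [h1, h2, h3]
        · simp [h1, h2, h3, ih]

theorem pvScan_iff (S : PySem.Set (List Char)) (rest : List Char) : ∀ pre,
    (pvScan S pre rest = true ↔
      ∃ l c r, rest = l ++ c :: r ∧ (c = '.' ∨ c = '[') ∧ (pre ++ l) ∈ S) := by
  induction rest with
  | nil =>
    intro pre
    simp [pvScan]
  | cons c rest ih =>
    intro pre
    simp only [pvScan]
    have hcond : (((c == '.' || c == '[') && PySem.Set.contains S pre) = true) ↔
        ((c = '.' ∨ c = '[') ∧ pre ∈ S) := by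
      simp [PySem.Set.contains]
    by_cases h : (c = '.' ∨ c = '[') ∧ pre ∈ S
    · rw [if_pos (hcond.mpr h)]
      exact iff_of_true rfl ⟨[], c, rest, rfl, h.1, by simpa using h.2⟩
    · rw [if_neg (fun hh => h (hcond.mp hh))]
      rw [ih (pre ++ [c])]
      constructor
      · rintro ⟨l, c', r, hre, hc', hmem⟩
        exact ⟨c :: l, c', r, by simp [hre], hc', by simpa using hmem⟩
      · rintro ⟨l, c', r, hre, hc', hmem⟩
        cases l with
        | nil =>
          exfalso
          have hc0 : c = c' ∧ rest = r := by simpa using hre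
          exact h ⟨by rw [hc0.1]; exact hc', by simpa using hmem⟩
        | cons x l =>
          have hx : c = x ∧ rest = l ++ c' :: r := by simpa using hre
          exact ⟨l, c', r, hx.2, hc', by simpa [hx.1] using hmem⟩

theorem pvC1_iff (f o : String) :
    pvC1 f o = true ↔ ∃ c r, (c = '.' ∨ c = '[') ∧ f.toList = o.toList ++ c :: r := by
  simp only [pvC1, Bool.or_eq_true, PySem.Chars.startswith_iff]
  constructor
  · rintro (⟨t, ht⟩ | ⟨t, ht⟩)
    · exact ⟨'.', t, Or.inl rfl, by simpa using ht.symm⟩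
    · exact ⟨'[', t, Or.inr rfl, by simpa using ht.symm⟩
  · rintro ⟨c, r, hc | hc, hf⟩
    · exact Or.inl ⟨r, by simp [hf, hc]⟩
    · exact Or.inr ⟨r, by simp [hf, hc]⟩

-- the prefix half: B's scan over the set of fields ≡ A's ∃ other with a C1 conflict
theorem pvScan_eq_existsC1 (fields : List String) (f : String) :
    pvScan (PySem.Set.ofList (fields.map String.toList)) [] f.toList = true ↔
      ∃ o ∈ fields, ¬(f = o) ∧ pvC1 f o = true := by
  rw [pvScan_iff]
  constructor
  · rintro ⟨l, c, r, hf, hc, hmem⟩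
    rw [List.nil_append] at hmem
    rw [PySem.Set.mem_ofList] at hmem
    rcases List.mem_map.mp hmem with ⟨o, ho, hol⟩
    refine ⟨o, ho, ?_, ?_⟩
    · intro he
      subst he
      rw [← hol] at hf
      have h2 := congrArg List.length hf
      simp at h2
    · exact (pvC1_iff f o).mpr ⟨c, r, hc, by rw [hol, hf]⟩
  · rintro ⟨o, ho, hne, hc1⟩
    rcases (pvC1_iff f o).mp hc1 with ⟨c, r, hc, hf⟩
    exact ⟨o.toList, c, r, hf, hc,
      by simpa [PySem.Set.mem_ofList] using List.mem_map_of_mem ho⟩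

-- the indexed group of parent p
def pvGroup (l : List String) (p : List Char) : List String :=
  l.filter (fun o => pvIndexed o && pvParent o == p)

-- running minimum (B's 'm is None or f < m' update), as a fold
def pvRunMin (a : Option String) (g : List String) : Option String :=
  g.foldl (fun a o => match a with
    | none => some o
    | some m => if PySem.Chars.strLt o.toList m.toList then some o else some m) a

theorem pvMinFold_get? (l : List String) : ∀ (d : PySem.Dict (List Char) String) (p : List Char),
    PySem.Dict.get? (l.foldl pvMinStep d) p = pvRunMin (PySem.Dict.get? d p) (pvGroup l p) := by
  induction l with
  | nil => intro d p; rfl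
  | cons f rest ih =>
    intro d p
    simp only [List.foldl_cons, pvGroup, List.filter_cons]
    by_cases hidx : pvIndexed f
    · by_cases hp : pvParent f = p
      · subst hp
        simp only [hidx, beq_self_eq_true, Bool.and_true, if_true]
        rw [ih]
        have hd : PySem.Dict.get? (pvMinStep d f) (pvParent f) =
            (match PySem.Dict.get? d (pvParent f) with
              | none => some f
              | some m => if PySem.Chars.strLt f.toList m.toList then some f else some m) := by
          simp only [pvMinStep, hidx, if_true]
          cases h : PySem.Dict.get? d (pvParent f) with
          | none => simp [PySem.Dict.get?_insert_self]
          | some m =>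
            by_cases hlt : PySem.Chars.strLt f.toList m.toList
            · simp [hlt, PySem.Dict.get?_insert_self]
            · simp [hlt, h]
        rw [hd]
        cases PySem.Dict.get? d (pvParent f) <;> simp [pvGroup, pvRunMin]
      · have hbeq : (pvParent f == p) = false := by simpa using hp
        simp only [hidx, hbeq, Bool.and_false]
        rw [ih]
        have hd : PySem.Dict.get? (pvMinStep d f) p = PySem.Dict.get? d p := by
          simp only [pvMinStep, hidx, if_true]
          cases h : PySem.Dict.get? d (pvParent f) with
          | none => exact PySem.Dict.get?_insert_of_ne d f (fun hh => hp hh.symm)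
          | some m =>
            by_cases hlt : PySem.Chars.strLt f.toList m.toList
            · simp only [hlt, if_true]
              exact PySem.Dict.get?_insert_of_ne d f (fun hh => hp hh.symm)
            · simp [hlt]
        rw [hd]
        simp [pvGroup]
    · have hb : pvIndexed f = false := by simpa using hidx
      simp only [hb, Bool.false_and, pvMinStep]
      exact ih d p

theorem pvRunMin_some (g : List String) : ∀ a, ∃ m, pvRunMin (some a) g = some m := by
  induction g with
  | nil => intro a; exact ⟨a, rfl⟩
  | cons o g ih =>
    intro a
    simp only [pvRunMin, List.foldl_cons]
    by_cases hlt : PySem.Chars.strLt o.toList a.toList = true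
    · rw [if_pos hlt]; exact ih o
    · rw [if_neg hlt]; exact ih a

theorem pvRunMin_spec (g : List String) : ∀ a m, pvRunMin (some a) g = some m →
    (m = a ∨ m ∈ g) ∧ m.toList ≤ a.toList ∧ ∀ o ∈ g, m.toList ≤ o.toList := by
  induction g with
  | nil =>
    intro a m h
    obtain rfl : a = m := by simpa [pvRunMin] using h
    exact ⟨Or.inl rfl, le_refl _, by simp⟩
  | cons o g ih =>
    intro a m h
    simp only [pvRunMin, List.foldl_cons] at h
    by_cases hlt : PySem.Chars.strLt o.toList a.toList = true
    · rw [if_pos hlt] at h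
      have hoa : o.toList < a.toList := by simpa [PySem.Chars.strLt] using hlt
      rcases ih o m h with ⟨hmem, hle, hall⟩
      refine ⟨?_, le_of_lt (lt_of_le_of_lt hle hoa), ?_⟩
      · rcases hmem with rfl | hm
        · exact Or.inr List.mem_cons_self
        · exact Or.inr (List.mem_cons_of_mem _ hm)
      · intro x hx
        rcases List.mem_cons.mp hx with rfl | hx'
        · exact hle
        · exact hall x hx'
    · rw [if_neg hlt] at h
      have hao : a.toList ≤ o.toList := not_lt.mp (by simpa [PySem.Chars.strLt] using hlt)
      rcases ih a m h with ⟨hmem, hle, hall⟩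
      refine ⟨?_, hle, ?_⟩
      · rcases hmem with rfl | hm
        · exact Or.inl rfl
        · exact Or.inr (List.mem_cons_of_mem _ hm)
      · intro x hx
        rcases List.mem_cons.mp hx with rfl | hx'
        · exact le_trans hle hao
        · exact hall x hx'

-- the indexed half: f passes B's min-dict test ↔ f has no C3 conflict, for f ∈ fields, f indexed
theorem pvMins_iff (fields : List String) (f : String) (hf : f ∈ fields)
    (hidx : pvIndexed f = true) :
    (PySem.Dict.get? (fields.foldl pvMinStep PySem.Dict.empty) (pvParent f) == some f) = true ↔
      ¬ ∃ o ∈ fields, ¬(f = o) ∧ pvC3 f o = true := by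
  rw [pvMinFold_get?]
  have hfg : f ∈ pvGroup fields (pvParent f) := by
    simp [pvGroup, List.mem_filter, hf, hidx]
  obtain ⟨m, hm, hmg, hmin⟩ : ∃ m,
      pvRunMin (PySem.Dict.get? (PySem.Dict.empty (κ := List Char) (ν := String)) (pvParent f))
          (pvGroup fields (pvParent f)) = some m ∧
        m ∈ pvGroup fields (pvParent f) ∧
        ∀ o ∈ pvGroup fields (pvParent f), m.toList ≤ o.toList := by
    cases hg : pvGroup fields (pvParent f) with
    | nil => rw [hg] at hfg; exact absurd hfg List.not_mem_nil
    | cons a g =>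
      obtain ⟨m, hm⟩ := pvRunMin_some g a
      rcases pvRunMin_spec g a m hm with ⟨hmem, hle, hall⟩
      refine ⟨m, ?_, ?_, ?_⟩
      · have : pvRunMin (PySem.Dict.get? (PySem.Dict.empty (κ := List Char) (ν := String)) (pvParent f)) (a :: g) = pvRunMin (some a) g := rfl
        rw [this, hm]
      · rcases hmem with rfl | h
        · exact List.mem_cons_self
        · exact List.mem_cons_of_mem _ h
      · intro o ho
        rcases List.mem_cons.mp ho with rfl | ho'
        · exact hle
        · exact hall o ho'
  rw [hm]
  constructor
  · intro hbeq hex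
    have hmf : m = f := by simpa using hbeq
    subst hmf
    rcases hex with ⟨o, ho, _hne, hc3⟩
    simp only [pvC3, Bool.and_eq_true, beq_iff_eq] at hc3
    rcases hc3 with ⟨⟨⟨_hif, hio⟩, hpp⟩, hlt⟩
    have hog : o ∈ pvGroup fields (pvParent m) := by
      simp [pvGroup, List.mem_filter, ho, hio, hpp]
    have : o.toList < m.toList := by simpa [PySem.Chars.strLt] using hlt
    exact absurd this (not_lt.mpr (hmin o hog))
  · intro hnex
    by_contra hbeq
    have hmf : ¬ m = f := by simpa using hbeq
    have hmlt : PySem.Chars.strLt m.toList f.toList = true := by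
      have hle := hmin f hfg
      rcases lt_or_eq_of_le hle with h | h
      · simpa [PySem.Chars.strLt] using h
      · exact absurd (String.toList_inj.mp h) hmf
    apply hnex
    simp only [pvGroup, List.mem_filter, Bool.and_eq_true, beq_iff_eq] at hmg
    rcases hmg with ⟨hmem, him, hpm⟩
    exact ⟨m, hmem, fun he => hmf he.symm, by simp [pvC3, hidx, him, hpm, hmlt]⟩

-- A's conflict test as the disjunction of the two existentials
theorem pvAConflict_iff (fields : List String) (f : String) :
    pvAConflict f fields = true ↔
      ((∃ o ∈ fields, ¬(f = o) ∧ pvC1 f o = true) ∨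
       (∃ o ∈ fields, ¬(f = o) ∧ pvC3 f o = true)) := by
  rw [pvAConflict_eq_any]
  simp only [List.any_eq_true, Bool.and_eq_true, Bool.or_eq_true, Bool.not_eq_eq_eq_not,
    Bool.not_true, beq_eq_false_iff_ne, ne_eq]
  constructor
  · rintro ⟨o, ho, hne, h | h⟩
    · exact Or.inl ⟨o, ho, hne, h⟩
    · exact Or.inr ⟨o, ho, hne, h⟩
  · rintro (⟨o, ho, hne, h⟩ | ⟨o, ho, hne, h⟩)
    · exact ⟨o, ho, hne, Or.inl h⟩
    · exact ⟨o, ho, hne, Or.inr h⟩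

-- A's keep test equals B's keep test on every element of fields
theorem pvKeep_congr (fields : List String) (f : String) (hf : f ∈ fields) :
    (!pvAConflict f fields) =
      pvKeepB (PySem.Set.ofList (fields.map String.toList))
        (fields.foldl pvMinStep PySem.Dict.empty) f := by
  have hkeep : pvKeepB (PySem.Set.ofList (fields.map String.toList))
      (fields.foldl pvMinStep PySem.Dict.empty) f = true ↔
      ¬ ((∃ o ∈ fields, ¬(f = o) ∧ pvC1 f o = true) ∨
         (∃ o ∈ fields, ¬(f = o) ∧ pvC3 f o = true)) := by
    simp only [pvKeepB, Bool.and_eq_true, Bool.not_eq_eq_eq_not, Bool.not_true, not_or]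
    constructor
    · rintro ⟨hscan, hmins⟩
      refine ⟨?_, ?_⟩
      · intro hc1
        rw [← pvScan_eq_existsC1 fields f] at hc1
        rw [hc1] at hscan
        exact Bool.noConfusion hscan
      · by_cases hidx : pvIndexed f = true
        · rw [if_pos hidx] at hmins
          exact (pvMins_iff fields f hf hidx).mp hmins
        · rintro ⟨o, _, _, hc3⟩
          simp only [pvC3, Bool.and_eq_true] at hc3
          exact hidx hc3.1.1.1
    · rintro ⟨hnc1, hnc3⟩
      refine ⟨?_, ?_⟩
      · exact Bool.eq_false_iff.mpr (fun hh => hnc1 ((pvScan_eq_existsC1 fields f).mp hh))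
      · by_cases hidx : pvIndexed f = true
        · rw [if_pos hidx]
          exact (pvMins_iff fields f hf hidx).mpr hnc3
        · simp [Bool.eq_false_iff.mpr hidx]
  cases hA : pvAConflict f fields with
  | true =>
    have := (pvAConflict_iff fields f).mp hA
    have hk : ¬ pvKeepB (PySem.Set.ofList (fields.map String.toList))
        (fields.foldl pvMinStep PySem.Dict.empty) f = true := fun h => (hkeep.mp h) this
    simp [Bool.eq_false_iff.mpr hk]
  | false =>
    have hnc : ¬ ((∃ o ∈ fields, ¬(f = o) ∧ pvC1 f o = true) ∨
        (∃ o ∈ fields, ¬(f = o) ∧ pvC3 f o = true)) := by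
      intro h
      have := (pvAConflict_iff fields f).mpr h
      rw [hA] at this
      exact Bool.noConfusion this
    simp [hkeep.mpr hnc]

-- ===== VERDICT (by name: the statement is the Claim_ definition above) =====
theorem filter_conflicting_mongo_paths_py_spec : Claim_equal_filter_conflicting_mongo_paths_py := by
  unfold Claim_equal_filter_conflicting_mongo_paths_py
  intro fields _
  unfold Spec_filter_conflicting_mongo_paths_py
  have hA : filter_conflicting_mongo_paths_py fields =
      ((fields.filter (fun f => !pvAConflict f fields)).foldl pvDedupStep
        (PySem.Set.empty, [])).2 := by
    show ((List.foldl (fun acc f => if pvAConflict f fields then acc else acc ++ [f]) [] fields).foldl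
        pvDedupStep (PySem.Set.empty, [])).2 = _
    have hfun : (fun (acc : List String) f => if pvAConflict f fields then acc else acc ++ [f]) =
        (fun acc f => if (fun f => !pvAConflict f fields) f = true then acc ++ [f] else acc) := by
      funext acc f
      cases h : pvAConflict f fields <;> simp [h]
    rw [hfun, PySem.List.foldl_append_if_eq_filter, List.nil_append]
  have hB : filter_conflicting_mongo_paths_py_alt fields =
      ((fields.filter (pvKeepB (PySem.Set.ofList (fields.map String.toList))
          (fields.foldl pvMinStep PySem.Dict.empty))).foldl pvDedupStep
        (PySem.Set.empty, [])).2 := by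
    show ((List.foldl (fun st f => if pvKeepB (PySem.Set.ofList (fields.map String.toList))
            (fields.foldl pvMinStep PySem.Dict.empty) f then pvDedupStep st f else st)
          (PySem.Set.empty, []) fields)).2 = _
    rw [PySem.List.foldl_if_eq_foldl_filter]
  rw [hA, hB, List.filter_congr (fun f hf => pvKeep_congr fields f hf)]
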